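-- pv_equiv track=rewrite | github.com/MKBD0102/Algorithm_Practice | 프로그래머스/1/161990. 바탕화면 정리/바탕화면 정리.py | solution
-- ===== SOURCE A (Python) =====
-- def solution(wallpaper):
--     lux = 99
--     rdx = 0
--     luy = 99
--     rdy = 0
--     for i, row in enumerate(wallpaper):
--         if '#' in row:
--             luy = min(luy, row.find('#'))
--             rdy = max(rdy, row.rfind('#') + 1)
--             lux = min(lux, i)
--             rdx = max(rdx, i + 1)
--     return [lux, luy, rdx, rdy]
-- ===== SOURCE B (Python) =====
-- def solution(wallpaper):
--     rows = []
--     cols = []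
--     for i, row in enumerate(wallpaper):
--         for j, ch in enumerate(row):
--             if ch == '#':
--                 rows.append(i)
--                 cols.append(j)
--     if not rows:
--         return [99, 99, 0, 0]
--     return [min(rows), min(cols), max(rows) + 1, max(cols) + 1]
-- ===== Notes on version B (the rewrite author's own statement) =====
-- stated objective: alternative
-- what changed: A keeps four running min/max variables updated per row via str.find/str.rfind; B does a two-phase gather-then-aggregate: one nested scan collects all '#' row and column indices into two lists, then the answer is min/max over those lists (with the empty-grid sentinel [99,99,0,0]).
-- intended difference: On grids whose topmost '#' lies beyond row index 99 or whose leftmost '#' lies beyond column index 99, A returns 99 for that coordinate (its 99 sentinel caps the minimum), while B returns the true minimal index, which is the intended bounding-box corner. — e.g. on solution([" #"]): A returns [0, 99, 1, 101], B returns [0, 100, 1, 101]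
import Mathlib
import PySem

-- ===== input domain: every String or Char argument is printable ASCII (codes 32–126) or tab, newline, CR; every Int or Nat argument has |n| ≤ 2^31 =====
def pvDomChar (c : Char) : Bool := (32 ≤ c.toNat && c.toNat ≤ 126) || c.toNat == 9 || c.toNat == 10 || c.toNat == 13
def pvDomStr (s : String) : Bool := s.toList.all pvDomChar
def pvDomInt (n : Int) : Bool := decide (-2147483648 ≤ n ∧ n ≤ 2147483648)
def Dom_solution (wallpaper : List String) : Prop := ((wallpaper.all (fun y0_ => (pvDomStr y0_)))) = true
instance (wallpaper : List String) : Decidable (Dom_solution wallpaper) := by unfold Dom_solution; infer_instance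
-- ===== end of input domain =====

-- B gathers all '#' coordinates in one nested scan, then aggregates with min/max;
-- A keeps four running extrema per row via str.find/str.rfind. Same cost, different shape.

-- ===== PORT A =====
-- per-row update of the four running extrema (lux, rdx, luy, rdy)
def astep (s : Int × Int × Int × Int) (p : Int × String) : Int × Int × Int × Int :=
  if PySem.Str.isIn "#" p.2 then
    (min s.1 p.1, max s.2.1 (p.1 + 1),
     min s.2.2.1 (PySem.Str.find p.2 "#"), max s.2.2.2 (PySem.Str.rfind p.2 "#" + 1))
  else s

def solution (wallpaper : List String) : List Int :=
  let st := (PySem.List.enumerate wallpaper).foldl astep (99, 0, 99, 0)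
  [st.1, st.2.2.1, st.2.1, st.2.2.2]

-- ===== PORT B =====
-- inner loop over one row: append the row index i / column index to the two lists
def binner (i : Int) (acc : List Int × List Int) (q : Int × Char) : List Int × List Int :=
  if q.2 = '#' then (acc.1 ++ [i], acc.2 ++ [q.1]) else acc

def bstep (acc : List Int × List Int) (p : Int × String) : List Int × List Int :=
  (PySem.List.enumerate p.2.toList).foldl (binner p.1) acc

def solution_alt (wallpaper : List String) : List Int :=
  let rc := (PySem.List.enumerate wallpaper).foldl bstep ([], [])
  match rc.1, rc.2 with
  | r :: rs, c :: cs => [rs.foldl min r, cs.foldl min c, rs.foldl max r + 1, cs.foldl max c + 1]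
  | _, _ => [99, 99, 0, 0]

-- ===== PRECONDITION & SPEC =====
-- On grids whose topmost '#' lies beyond row index 99 or whose leftmost '#' lies beyond column
-- index 99, A returns 99 for that coordinate (its 99 sentinel caps the minimum), while B returns
-- the true minimal index, which is the intended bounding-box corner.
def D_solution (wallpaper : List String) : Prop :=
  (∃ s ∈ wallpaper, '#' ∈ s.toList) ∧
  ((∀ k : Nat, k < 100 → '#' ∉ (wallpaper.getD k "").toList) ∨
   (∀ s ∈ wallpaper, ∀ k : Nat, k < 100 → s.toList.getD k ' ' ≠ '#'))
instance (wallpaper : List String) : Decidable (D_solution wallpaper) := by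
  unfold D_solution; infer_instance

def Spec_solution (wallpaper : List String) (out : List Int) : Prop :=
  ¬ D_solution wallpaper → out = solution_alt wallpaper
instance (wallpaper : List String) (out : List Int) : Decidable (Spec_solution wallpaper out) := by
  unfold Spec_solution; infer_instance

def pvDiffWitness_solution : List String :=
  ["                                                                                                    #"]

def pvDiffWitnessOut_solution : (List Int) × (List Int) :=
  ([0, 99, 1, 101], [0, 100, 1, 101])

-- ===== CLAIM (what is proved, stated in full; the proofs are below) =====
def Claim_unchanged_solution : Prop :=
  ∀ (wallpaper : List String), Dom_solution wallpaper → Spec_solution wallpaper (solution wallpaper)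
def Claim_changed_solution : Prop :=
  Dom_solution (pvDiffWitness_solution) ∧ D_solution (pvDiffWitness_solution) ∧
  solution (pvDiffWitness_solution) = pvDiffWitnessOut_solution.1 ∧
  solution_alt (pvDiffWitness_solution) = pvDiffWitnessOut_solution.2 ∧
  pvDiffWitnessOut_solution.1 ≠ pvDiffWitnessOut_solution.2
def Claim_exact_solution : Prop :=
  ∀ (wallpaper : List String), Dom_solution wallpaper → D_solution wallpaper →
    solution wallpaper ≠ solution_alt wallpaper

-- ===== LEMMAS AND PROOFS =====

-- column indices (as Ints, offset j) of '#' in one row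
def hcols : List Char → Int → List Int
  | [], _ => []
  | c :: t, j => (if c = '#' then [j] else []) ++ hcols t (j + 1)

-- all row indices of '#'s (one per '#'), and all column indices, over the whole grid
def rowsOf : List String → Int → List Int
  | [], _ => []
  | s :: t, i => List.replicate (s.toList.count '#') i ++ rowsOf t (i + 1)

def colsOf : List String → Int → List Int
  | [], _ => []
  | s :: t, i => hcols s.toList 0 ++ colsOf t (i + 1)

theorem mem_hcols {l : List Char} {j x : Int} :
    x ∈ hcols l j ↔ ∃ k : Nat, l[k]? = some '#' ∧ x = j + k := by
  induction l generalizing j with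
  | nil => simp [hcols]
  | cons c t ih =>
    simp only [hcols, List.mem_append]
    constructor
    · rintro (h | h)
      · refine ⟨0, ?_, ?_⟩ <;> split_ifs at h with hc <;> simp_all
      · obtain ⟨k, hk, hx⟩ := ih.1 h
        exact ⟨k + 1, by simpa using hk, by push_cast; omega⟩
    · rintro ⟨k, hk, hx⟩
      cases k with
      | zero => left; simp at hk; simp [hk, hx]
      | succ k =>
        right; exact ih.2 ⟨k, by simpa using hk, by push_cast at hx ⊢; omega⟩

theorem hcols_eq_nil_iff {l : List Char} {j : Int} : hcols l j = [] ↔ '#' ∉ l := by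
  induction l generalizing j with
  | nil => simp [hcols]
  | cons c t ih =>
    simp only [hcols, List.append_eq_nil_iff, List.mem_cons]
    constructor
    · rintro ⟨h1, h2⟩ h
      rcases h with h | h
      · subst h; simp at h1
      · exact (ih.1 h2) h
    · intro h
      refine ⟨?_, ih.2 fun hm => h (Or.inr hm)⟩
      split_ifs with hc
      · exact absurd (Or.inl hc.symm) h
      · rfl

theorem inner_eq (l : List Char) : ∀ (j i : Int) (acc : List Int × List Int),
    (PySem.List.enumerate l j).foldl (binner i) acc
      = (acc.1 ++ List.replicate (l.count '#') i, acc.2 ++ hcols l j) := by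
  induction l with
  | nil => intro j i acc; simp [PySem.List.enumerate_nil, hcols]
  | cons c t ih =>
    intro j i acc
    rw [PySem.List.enumerate_cons, List.foldl_cons, ih]
    by_cases hc : c = '#' <;>
      simp [binner, hc, hcols, List.replicate_succ, List.append_assoc]

theorem bfold_eq (wp : List String) : ∀ (i : Int) (acc : List Int × List Int),
    (PySem.List.enumerate wp i).foldl bstep acc
      = (acc.1 ++ rowsOf wp i, acc.2 ++ colsOf wp i) := by
  induction wp with
  | nil => intro i acc; simp [PySem.List.enumerate_nil, rowsOf, colsOf]
  | cons s t ih =>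
    intro i acc
    rw [PySem.List.enumerate_cons, List.foldl_cons, show bstep acc (i, s)
        = (PySem.List.enumerate s.toList 0).foldl (binner i) acc from rfl, inner_eq, ih]
    simp [rowsOf, colsOf, List.append_assoc]

theorem foldl_min_le_self (l : List Int) (a : Int) : l.foldl min a ≤ a := by
  induction l generalizing a with
  | nil => simp
  | cons b t ih => exact le_trans (ih (min a b)) (min_le_left _ _)

theorem foldl_min_le_mem {l : List Int} {a x : Int} (h : x ∈ a :: l) : l.foldl min a ≤ x := by
  induction l generalizing a with
  | nil => simp_all
  | cons b t ih =>
    simp only [List.foldl]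
    rcases List.mem_cons.1 h with h | h
    · exact le_trans (foldl_min_le_self t (min a b)) (h ▸ min_le_left _ _)
    · rcases List.mem_cons.1 h with h | h
      · exact le_trans (foldl_min_le_self t (min a b)) (h ▸ min_le_right _ _)
      · exact ih (List.mem_cons_of_mem _ h)

theorem foldl_min_mem (l : List Int) (a : Int) : l.foldl min a ∈ a :: l := by
  induction l generalizing a with
  | nil => simp
  | cons b t ih =>
    simp only [List.foldl]
    rcases List.mem_cons.1 (ih (min a b)) with h | h
    · rw [h]
      rcases le_total a b with hab | hab
      · rw [min_eq_left hab]; exact List.mem_cons_self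
      · rw [min_eq_right hab]; exact List.mem_cons.2 (Or.inr List.mem_cons_self)
    · exact List.mem_cons.2 (Or.inr (List.mem_cons_of_mem _ h))

theorem foldl_max_mem (l : List Int) (a : Int) : l.foldl max a ∈ a :: l := by
  induction l generalizing a with
  | nil => simp
  | cons b t ih =>
    simp only [List.foldl]
    rcases List.mem_cons.1 (ih (max a b)) with h | h
    · rw [h]
      rcases le_total a b with hab | hab
      · rw [max_eq_right hab]; exact List.mem_cons.2 (Or.inr List.mem_cons_self)
      · rw [max_eq_left hab]; exact List.mem_cons_self
    · exact List.mem_cons.2 (Or.inr (List.mem_cons_of_mem _ h))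

theorem le_self_foldl_max (l : List Int) (a : Int) : a ≤ l.foldl max a := by
  induction l generalizing a with
  | nil => simp
  | cons b t ih => exact le_trans (le_max_left a b) (ih (max a b))

theorem mem_le_foldl_max {l : List Int} {a x : Int} (h : x ∈ a :: l) : x ≤ l.foldl max a := by
  induction l generalizing a with
  | nil => simp_all
  | cons b t ih =>
    simp only [List.foldl]
    rcases List.mem_cons.1 h with h | h
    · exact le_trans (h ▸ le_max_left a b) (le_self_foldl_max t (max a b))
    · rcases List.mem_cons.1 h with h | h
      · exact le_trans (h ▸ le_max_right a b) (le_self_foldl_max t (max a b))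
      · exact ih (List.mem_cons_of_mem _ h)

theorem foldl_min_assoc (l : List Int) (a b : Int) :
    l.foldl min (min a b) = min a (l.foldl min b) := by
  induction l generalizing b with
  | nil => simp
  | cons c t ih => simp only [List.foldl, min_assoc, ih]

theorem foldl_min_of_min_mem {l : List Int} {m : Int} (a : Int)
    (hm : m ∈ l) (hmin : ∀ x ∈ l, m ≤ x) : l.foldl min a = min a m := by
  have h1 : l.foldl min a ≤ min a m :=
    le_min (foldl_min_le_mem List.mem_cons_self) (foldl_min_le_mem (List.mem_cons_of_mem _ hm))
  have h2 : min a m ≤ l.foldl min a := by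
    rcases List.mem_cons.1 (foldl_min_mem l a) with h | h
    · rw [h]; exact min_le_left _ _
    · exact le_trans (min_le_right _ _) (hmin _ h)
  omega

theorem foldl_max_of_max_mem {l : List Int} {m : Int} (a : Int)
    (hm : m ∈ l) (hmax : ∀ x ∈ l, x ≤ m) : l.foldl max a = max a m := by
  have h1 : max a m ≤ l.foldl max a :=
    max_le (mem_le_foldl_max List.mem_cons_self) (mem_le_foldl_max (List.mem_cons_of_mem _ hm))
  have h2 : l.foldl max a ≤ max a m := by
    rcases List.mem_cons.1 (foldl_max_mem l a) with h | h
    · rw [h]; exact le_max_left _ _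
    · exact le_trans (hmax _ h) (le_max_right _ _)
  omega

theorem foldl_max_map_add_one (l : List Int) (a : Int) :
    (l.map (· + 1)).foldl max (a + 1) = l.foldl max a + 1 := by
  induction l generalizing a with
  | nil => simp
  | cons b t ih =>
    simp only [List.map, List.foldl]
    rw [show max (a + 1) (b + 1) = max a b + 1 by omega, ih]

theorem isIn_hash_iff (s : String) : PySem.Str.isIn "#" s = true ↔ '#' ∈ s.toList := by
  rw [PySem.Str.isIn_iff_infix, show "#".toList = ['#'] from rfl]
  exact List.singleton_infix_iff _ _

theorem singleton_prefix_drop {a : Char} {l : List Char} {n : Nat} :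
    [a] <+: l.drop n ↔ l[n]? = some a := by
  rw [show ([a] <+: l.drop n) ↔ (l.drop n).head? = some a from ?_, List.head?_drop]
  cases hm : l.drop n with
  | nil => simp
  | cons b t => simp [List.cons_prefix_cons, eq_comm]

theorem find_hash_spec {l : List Char} (h : '#' ∈ l) :
    PySem.Chars.find l ['#'] ∈ hcols l 0 ∧ ∀ x ∈ hcols l 0, PySem.Chars.find l ['#'] ≤ x := by
  have hnn : 0 ≤ PySem.Chars.find l ['#'] :=
    (PySem.Chars.find_nonneg_iff l ['#']).2 ((List.singleton_infix_iff _ _).2 h)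
  obtain ⟨hpre, hmin⟩ := PySem.Chars.find_spec hnn
  constructor
  · exact mem_hcols.2 ⟨(PySem.Chars.find l ['#']).toNat, singleton_prefix_drop.1 hpre,
      by omega⟩
  · intro x hx
    obtain ⟨k, hk, hxk⟩ := mem_hcols.1 hx
    by_contra hlt
    exact hmin k (by omega) (singleton_prefix_drop.2 hk)

theorem rfind_go_hash (l sub : List Char) : ∀ j : Nat,
    (PySem.Chars.rfind.go l sub j = -1 ∧ ∀ k : Nat, k ≤ j → ¬ (sub <+: l.drop k))
  ∨ (∃ m : Nat, m ≤ j ∧ (sub <+: l.drop m) ∧ PySem.Chars.rfind.go l sub j = m ∧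
      ∀ k : Nat, m < k → k ≤ j → ¬ (sub <+: l.drop k)) := by
  intro j
  induction j with
  | zero =>
    rw [PySem.Chars.rfind.go]
    split_ifs with hp
    · right
      exact ⟨0, le_refl 0, by simpa using List.isPrefixOf_iff_prefix.1 hp, rfl,
        fun k h1 h2 => by omega⟩
    · left
      refine ⟨rfl, fun k hk => ?_⟩
      interval_cases k
      exact fun hc => hp (List.isPrefixOf_iff_prefix.2 (by simpa using hc))
  | succ j ih =>
    rw [PySem.Chars.rfind.go]
    split_ifs with hp
    · right
      refine ⟨j + 1, le_refl _, List.isPrefixOf_iff_prefix.1 hp, by push_cast; ring, ?_⟩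
      intro k h1 h2 _
      omega
    · have hnp : ¬ (sub <+: l.drop (j + 1)) := fun hc => hp (List.isPrefixOf_iff_prefix.2 hc)
      rcases ih with ⟨he, hall⟩ | ⟨m, hm, hpre, he, hmax⟩
      · left
        refine ⟨he, fun k hk => ?_⟩
        rcases Nat.lt_or_ge k (j + 1) with hlt | hge
        · exact hall k (by omega)
        · have : k = j + 1 := by omega
          subst this; exact hnp
      · right
        refine ⟨m, by omega, hpre, he, fun k h1 h2 => ?_⟩
        rcases Nat.lt_or_ge k (j + 1) with hlt | hge
        · exact hmax k h1 (by omega)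
        · have : k = j + 1 := by omega
          subst this; exact hnp

theorem rfind_hash_spec {l : List Char} (h : '#' ∈ l) :
    PySem.Chars.rfind l ['#'] ∈ hcols l 0 ∧ ∀ x ∈ hcols l 0, x ≤ PySem.Chars.rfind l ['#'] := by
  obtain ⟨n, hn, hv⟩ := List.mem_iff_getElem.1 h
  have hpre0 : ['#'] <+: l.drop n := singleton_prefix_drop.2 (by simp [List.getElem?_eq_getElem hn, hv])
  rcases rfind_go_hash l ['#'] l.length with ⟨_, hall⟩ | ⟨m, hm, hpre, he, hmax⟩
  · exact absurd hpre0 (hall n (by omega))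
  · have hrf : PySem.Chars.rfind l ['#'] = m := he
    have hkm : l[m]? = some '#' := singleton_prefix_drop.1 hpre
    constructor
    · exact mem_hcols.2 ⟨m, hkm, by omega⟩
    · intro x hx
      obtain ⟨k, hk, hxk⟩ := mem_hcols.1 hx
      have hklen : k < l.length := (List.getElem?_eq_some_iff.1 hk).1
      by_contra hlt
      exact hmax k (by omega) (by omega) (singleton_prefix_drop.2 hk)

theorem foldl_min_replicate {n : Nat} (hn : n ≠ 0) (a i : Int) :
    (List.replicate n i).foldl min a = min a i := by
  induction n generalizing a with
  | zero => cases hn rfl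
  | succ n ih =>
    rw [List.replicate_succ, List.foldl_cons]
    cases n with
    | zero => simp
    | succ m => rw [ih (Nat.succ_ne_zero m), min_assoc, min_self]

theorem foldl_max_replicate {n : Nat} (hn : n ≠ 0) (a i : Int) :
    (List.replicate n i).foldl max a = max a i := by
  induction n generalizing a with
  | zero => cases hn rfl
  | succ n ih =>
    rw [List.replicate_succ, List.foldl_cons]
    cases n with
    | zero => simp
    | succ m => rw [ih (Nat.succ_ne_zero m), max_assoc, max_self]

theorem afold_eq (wp : List String) : ∀ (i : Int) (st : Int × Int × Int × Int),
    (PySem.List.enumerate wp i).foldl astep st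
      = ((rowsOf wp i).foldl min st.1, ((rowsOf wp i).map (· + 1)).foldl max st.2.1,
         (colsOf wp i).foldl min st.2.2.1, ((colsOf wp i).map (· + 1)).foldl max st.2.2.2) := by
  induction wp with
  | nil => intro i st; simp [PySem.List.enumerate_nil, rowsOf, colsOf]
  | cons r t ih =>
    intro i st
    rw [PySem.List.enumerate_cons, List.foldl_cons, ih]
    simp only [rowsOf, colsOf, List.map_append, List.foldl_append, List.map_replicate]
    by_cases hIn : '#' ∈ r.toList
    · have hstep : astep st (i, r)
          = (min st.1 i, max st.2.1 (i + 1), min st.2.2.1 (PySem.Chars.find r.toList ['#']),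
             max st.2.2.2 (PySem.Chars.rfind r.toList ['#'] + 1)) := by
        unfold astep
        rw [if_pos ((isIn_hash_iff r).2 hIn)]
        rfl
      have hcnt : r.toList.count '#' ≠ 0 := by
        have := List.count_pos_iff.2 hIn; omega
      obtain ⟨hfm, hfmin⟩ := find_hash_spec hIn
      obtain ⟨hrm, hrmax⟩ := rfind_hash_spec hIn
      rw [hstep]
      refine Prod.ext ?_ (Prod.ext ?_ (Prod.ext ?_ ?_)) <;> simp only
      · rw [foldl_min_replicate hcnt]
      · rw [foldl_max_replicate hcnt]
      · rw [foldl_min_of_min_mem st.2.2.1 hfm hfmin]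
      · rw [foldl_max_of_max_mem st.2.2.2
          (List.mem_map.2 ⟨_, hrm, rfl⟩) ?_]
        rintro y hy
        obtain ⟨x, hx, rfl⟩ := List.mem_map.1 hy
        have := hrmax x hx
        omega
    · have hstep : astep st (i, r) = st := by
        unfold astep
        rw [if_neg (by rw [isIn_hash_iff]; exact hIn)]
      have hcnt : r.toList.count '#' = 0 := List.count_eq_zero.2 hIn
      have hc0 : hcols r.toList 0 = [] := hcols_eq_nil_iff.2 hIn
      rw [hstep, hcnt, hc0]
      simp

theorem mem_rowsOf {wp : List String} : ∀ {i x : Int},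
    x ∈ rowsOf wp i ↔ ∃ (k : Nat) (s : String), wp[k]? = some s ∧ '#' ∈ s.toList ∧ x = i + k := by
  induction wp with
  | nil => intro i x; simp [rowsOf]
  | cons s t ih =>
    intro i x
    simp only [rowsOf, List.mem_append, List.mem_replicate, ih]
    constructor
    · rintro (⟨hn, hx⟩ | ⟨k, s', hk, hs', hx⟩)
      · exact ⟨0, s, by simp, List.count_pos_iff.1 (Nat.pos_of_ne_zero hn), by simp [hx]⟩
      · exact ⟨k + 1, s', by simpa using hk, hs', by push_cast; omega⟩
    · rintro ⟨k, s', hk, hs', hx⟩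
      cases k with
      | zero =>
        left
        simp only [List.getElem?_cons_zero, Option.some.injEq] at hk
        subst hk
        refine ⟨?_, by simp [hx]⟩
        have := List.count_pos_iff.2 hs'
        omega
      | succ k =>
        right; exact ⟨k, s', by simpa using hk, hs', by push_cast at hx ⊢; omega⟩

theorem mem_colsOf {wp : List String} : ∀ {i x : Int},
    x ∈ colsOf wp i ↔ ∃ s ∈ wp, x ∈ hcols s.toList 0 := by
  induction wp with
  | nil => intro i x; simp [colsOf]
  | cons s t ih =>
    intro i x
    simp only [colsOf, List.mem_append, ih, List.mem_cons]
    constructor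
    · rintro (h | ⟨s', hs', hx⟩)
      · exact ⟨s, Or.inl rfl, h⟩
      · exact ⟨s', Or.inr hs', hx⟩
    · rintro ⟨s', hs' | hs', hx⟩
      · subst hs'; exact Or.inl hx
      · exact Or.inr ⟨s', hs', hx⟩

theorem rowsOf_eq_nil_iff {wp : List String} {i : Int} :
    rowsOf wp i = [] ↔ ∀ s ∈ wp, '#' ∉ s.toList := by
  induction wp generalizing i with
  | nil => simp [rowsOf]
  | cons s t ih =>
    simp only [rowsOf, List.append_eq_nil_iff, List.replicate_eq_nil_iff, ih,
      List.count_eq_zero, List.forall_mem_cons]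

theorem colsOf_eq_nil_iff {wp : List String} {i : Int} :
    colsOf wp i = [] ↔ ∀ s ∈ wp, '#' ∉ s.toList := by
  induction wp generalizing i with
  | nil => simp [colsOf]
  | cons s t ih =>
    simp only [colsOf, List.append_eq_nil_iff, hcols_eq_nil_iff, ih, List.forall_mem_cons]

theorem solution_eq_repr (wp : List String) :
    solution wp = [(rowsOf wp 0).foldl min 99, (colsOf wp 0).foldl min 99,
      ((rowsOf wp 0).map (· + 1)).foldl max 0, ((colsOf wp 0).map (· + 1)).foldl max 0] := by
  unfold solution
  rw [afold_eq]

theorem solution_alt_eq_repr (wp : List String) :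
    solution_alt wp = (match rowsOf wp 0, colsOf wp 0 with
      | r :: rs, c :: cs => [rs.foldl min r, cs.foldl min c, rs.foldl max r + 1, cs.foldl max c + 1]
      | _, _ => [99, 99, 0, 0]) := by
  unfold solution_alt
  rw [bfold_eq]
  simp only [List.nil_append]

theorem min_block {r : Int} {rs : List Int} (h : ∃ x ∈ r :: rs, x ≤ 99) :
    (r :: rs).foldl min 99 = rs.foldl min r := by
  rw [List.foldl_cons, foldl_min_assoc]
  obtain ⟨x, hx, hx99⟩ := h
  exact min_eq_right (le_trans (foldl_min_le_mem hx) hx99)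

theorem max_block {r : Int} {rs : List Int} (hr : 0 ≤ r) :
    ((r :: rs).map (· + 1)).foldl max 0 = rs.foldl max r + 1 := by
  rw [List.map_cons, List.foldl_cons, show max (0 : Int) (r + 1) = r + 1 by omega,
    foldl_max_map_add_one]

theorem getD_some_of_mem {wp : List String} {k : Nat} (h : '#' ∈ (wp.getD k "").toList) :
    wp[k]? = some (wp.getD k "") := by
  cases hkk : wp[k]? with
  | none => rw [List.getD_eq_getElem?_getD, hkk] at h; simp at h
  | some s => rw [List.getD_eq_getElem?_getD, hkk]; rfl

theorem getElem?_char_of_getD {l : List Char} {k : Nat} (h : l.getD k ' ' = '#') :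
    l[k]? = some '#' := by
  cases hkk : l[k]? with
  | none => rw [List.getD_eq_getElem?_getD, hkk] at h; simp at h
  | some ch => rw [List.getD_eq_getElem?_getD, hkk] at h; simp at h; rw [h]

theorem rowsOf_nonneg {wp : List String} {x : Int} (hx : x ∈ rowsOf wp 0) : 0 ≤ x := by
  obtain ⟨k, s, _, _, hxk⟩ := mem_rowsOf.1 hx; omega

theorem colsOf_nonneg {wp : List String} {x : Int} (hx : x ∈ colsOf wp 0) : 0 ≤ x := by
  obtain ⟨s, _, hxh⟩ := mem_colsOf.1 hx
  obtain ⟨k, _, hxk⟩ := mem_hcols.1 hxh; omega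

-- ===== VERDICT =====
theorem solution_spec : Claim_unchanged_solution := by
  intro wp _ hnD
  rw [solution_eq_repr, solution_alt_eq_repr]
  cases hR : rowsOf wp 0 with
  | nil =>
    have hC : colsOf wp 0 = [] := colsOf_eq_nil_iff.2 (rowsOf_eq_nil_iff.1 hR)
    rw [hC]
    simp
  | cons r rs =>
    have hHash : ∃ s ∈ wp, '#' ∈ s.toList := by
      by_contra hno
      push Not at hno
      rw [rowsOf_eq_nil_iff.2 hno] at hR
      simp at hR
    have hCne : colsOf wp 0 ≠ [] := by
      rw [Ne, colsOf_eq_nil_iff]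
      intro hall
      rw [rowsOf_eq_nil_iff.2 hall] at hR
      simp at hR
    obtain ⟨c, cs, hC⟩ := List.exists_cons_of_ne_nil hCne
    rw [hC]
    obtain ⟨hnP, hnQ⟩ := not_or.1 fun hor => hnD ⟨hHash, hor⟩
    push Not at hnP hnQ
    obtain ⟨k, hk100, hkmem⟩ := hnP
    have hrow99 : ∃ x ∈ rowsOf wp 0, x ≤ 99 :=
      ⟨(0 : Int) + k, mem_rowsOf.2 ⟨k, _, getD_some_of_mem hkmem, hkmem, rfl⟩, by omega⟩
    have hcol99 : ∃ x ∈ colsOf wp 0, x ≤ 99 := by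
      obtain ⟨s, hs, k', hk'100, hk'c⟩ := hnQ
      exact ⟨(0 : Int) + k',
        mem_colsOf.2 ⟨s, hs, mem_hcols.2 ⟨k', getElem?_char_of_getD hk'c, rfl⟩⟩, by omega⟩
    have hr0 : 0 ≤ r := rowsOf_nonneg (hR ▸ List.mem_cons_self)
    have hc0 : 0 ≤ c := colsOf_nonneg (hC ▸ List.mem_cons_self)
    rw [min_block (hR ▸ hrow99), min_block (hC ▸ hcol99), max_block hr0, max_block hc0]

theorem rowsOf_ne_nil_of_hash {wp : List String} (h : ∃ s ∈ wp, '#' ∈ s.toList) :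
    rowsOf wp 0 ≠ [] := by
  intro hnil
  obtain ⟨s, hs, hm⟩ := h
  exact rowsOf_eq_nil_iff.1 hnil s hs hm

theorem colsOf_ne_nil_of_hash {wp : List String} (h : ∃ s ∈ wp, '#' ∈ s.toList) :
    colsOf wp 0 ≠ [] := by
  intro hnil
  obtain ⟨s, hs, hm⟩ := h
  exact colsOf_eq_nil_iff.1 hnil s hs hm

set_option maxRecDepth 40000 in
theorem solution_changed : Claim_changed_solution := by
  unfold Claim_changed_solution; decide

theorem solution_tight : Claim_exact_solution := by
  intro wp _ hD
  obtain ⟨hHash, hPQ⟩ := hD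
  obtain ⟨r, rs, hR⟩ := List.exists_cons_of_ne_nil (rowsOf_ne_nil_of_hash hHash)
  obtain ⟨c, cs, hC⟩ := List.exists_cons_of_ne_nil (colsOf_ne_nil_of_hash hHash)
  rw [solution_eq_repr, solution_alt_eq_repr, hR, hC]
  intro heq
  simp only [List.cons.injEq, and_true] at heq
  obtain ⟨h1, h2, -⟩ := heq
  rcases hPQ with hP | hQ
  · have hge : ∀ x ∈ rowsOf wp 0, 100 ≤ x := by
      intro x hx
      obtain ⟨k, s', hk, hmem', hxk⟩ := mem_rowsOf.1 hx
      by_contra hlt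
      have hgd : wp.getD k "" = s' := by
        rw [List.getD_eq_getElem?_getD, hk]; rfl
      exact hP k (by omega) (hgd ▸ hmem')
    have hBmin : 100 ≤ rs.foldl min r := hge _ (hR ▸ foldl_min_mem rs r)
    have hAmin : (r :: rs).foldl min 99 ≤ 99 := foldl_min_le_mem List.mem_cons_self
    omega
  · have hge : ∀ x ∈ colsOf wp 0, 100 ≤ x := by
      intro x hx
      obtain ⟨s', hs', hxh⟩ := mem_colsOf.1 hx
      obtain ⟨k, hk, hxk⟩ := mem_hcols.1 hxh
      by_contra hlt
      refine hQ s' hs' k (by omega) ?_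
      rw [List.getD_eq_getElem?_getD, hk]; rfl
    have hBmin : 100 ≤ cs.foldl min c := hge _ (hC ▸ foldl_min_mem cs c)
    have hAmin : (c :: cs).foldl min 99 ≤ 99 := foldl_min_le_mem List.mem_cons_self
    omega
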